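-- pv_equiv track=rewrite | github.com/mragarg/string-exercises-python | string_exercises.py | long_vowel
-- ===== SOURCE A (Python) =====
-- def long_vowel(string):
--     count = 0
--     index = 0
--     for letter in string:
--         if letter in ("a", "e", "i", "o", "u"):
--             count += 1
--         if count == 2:
--             return string[:index] + (letter * 3) + string[index:]
--         index += 1
-- ===== SOURCE B (Python) =====
-- def long_vowel(string):
--     def next_vowel(start):
--         hits = [j for j in (string.find(v, start) for v in "aeiou") if j != -1]
--         return min(hits) if hits else -1
--     i = next_vowel(0)
--     if i == -1:
--         return None
--     j = next_vowel(i + 1)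
--     if j == -1:
--         return None
--     return string[:j] + string[j:j + 1] * 3 + string[j:]
-- ===== Notes on version B (the rewrite author's own statement) =====
-- stated objective: alternative
-- what changed: Replaces A's single counting character scan (count/index state with early return) by per-vowel str.find substring searches with a start offset, taking the minimum hit to get each next vowel position (done twice), then splicing with slices only.
import Mathlib
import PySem

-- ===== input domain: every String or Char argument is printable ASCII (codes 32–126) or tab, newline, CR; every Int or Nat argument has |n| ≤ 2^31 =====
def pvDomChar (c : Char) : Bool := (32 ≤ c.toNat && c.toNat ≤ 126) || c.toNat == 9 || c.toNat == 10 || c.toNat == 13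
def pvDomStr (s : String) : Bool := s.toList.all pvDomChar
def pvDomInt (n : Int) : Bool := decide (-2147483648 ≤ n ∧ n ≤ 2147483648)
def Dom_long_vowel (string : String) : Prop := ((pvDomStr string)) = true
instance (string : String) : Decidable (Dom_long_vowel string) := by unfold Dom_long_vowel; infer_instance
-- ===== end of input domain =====

set_option maxRecDepth 4096


-- B locates the second vowel by per-vowel substring searches (str.find with a start
-- offset, one per vowel, taking the minimum hit, twice) instead of A's counting
-- character scan, then splices with slices only (objective: alternative).

-- vowel membership test ('letter in ("a","e","i","o","u")')
def pvVow (c : Char) : Bool := c = 'a' || c = 'e' || c = 'i' || c = 'o' || c = 'u'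

-- ===== PORT A =====
-- A's for-loop with its count/index state and early return
def pvLoopA (s : List Char) : List Char → Nat → Nat → Option String
  | [], _, _ => none
  | letter :: rest, count, index =>
    let count' := if pvVow letter then count + 1 else count
    if count' = 2 then
      some (String.ofList (PySem.List.slice s none (some (index : Int)) ++
        [letter, letter, letter] ++ PySem.List.slice s (some (index : Int)) none))
    else pvLoopA s rest count' (index + 1)

def long_vowel (string : String) : Option String :=
  pvLoopA string.toList string.toList 0 0

-- ===== PORT B =====
-- 'next_vowel(start)': string.find(v, start) for each v in "aeiou", keep the hits (≠ -1),
-- min of the hits if any else -1 ('min(hits) if hits else -1'; min? none ↔ hits = [])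
def pvNextVowel (s : List Char) (start : Int) : Int :=
  let hits := (("aeiou".toList).map (fun v => PySem.Chars.findFrom s [v] start)).filter
    (fun j => j != -1)
  match PySem.List.min? hits (fun x => x) with
  | some m => m
  | none => -1

def long_vowel_alt (string : String) : Option String :=
  let s := string.toList
  let i := pvNextVowel s 0
  if i = -1 then none
  else
    let j := pvNextVowel s (i + 1)
    if j = -1 then none
    else
      -- string[:j] + string[j:j+1]*3 + string[j:]
      some (String.ofList (PySem.List.slice s none (some j) ++
        (PySem.List.slice s (some j) (some (j + 1)) ++
         PySem.List.slice s (some j) (some (j + 1)) ++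
         PySem.List.slice s (some j) (some (j + 1))) ++
        PySem.List.slice s (some j) none))

-- ===== PRECONDITION & SPEC =====
def Spec_long_vowel (string : String) (out : Option String) : Prop := out = long_vowel_alt string
instance (string : String) (out : Option String) : Decidable (Spec_long_vowel string out) := by unfold Spec_long_vowel; infer_instance

-- ===== CLAIM (what is proved, stated in full; the proofs are below) =====
def Claim_equal_long_vowel : Prop := ∀ (string : String), Dom_long_vowel string → Spec_long_vowel string (long_vowel string)

-- ===== LEMMAS AND PROOFS =====

-- index of the first vowel of a list (the common specification both sides meet)
def pvFV : List Char → Option Nat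
  | [] => none
  | c :: t => if pvVow c then some 0 else (pvFV t).map (· + 1)

theorem pvFV_lt {l : List Char} {p : Nat} (h : pvFV l = some p) : p < l.length := by
  induction l generalizing p with
  | nil => simp [pvFV] at h
  | cons c t ih =>
    by_cases hv : pvVow c
    · simp [pvFV, hv] at h; subst h; simp
    · simp [pvFV, hv] at h
      obtain ⟨q, hq, rfl⟩ := h
      have := ih hq; simp; omega

theorem pvFV_get {l : List Char} {p : Nat} (h : pvFV l = some p) :
    ∃ c, l[p]? = some c ∧ pvVow c = true := by
  induction l generalizing p with
  | nil => simp [pvFV] at h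
  | cons c t ih =>
    by_cases hv : pvVow c
    · simp [pvFV, hv] at h; subst h; exact ⟨c, rfl, hv⟩
    · simp [pvFV, hv] at h
      obtain ⟨q, hq, rfl⟩ := h
      obtain ⟨d, hd, hvd⟩ := ih hq
      exact ⟨d, by simpa using hd, hvd⟩

theorem pvFV_min {l : List Char} {p : Nat} (h : pvFV l = some p) :
    ∀ m, m < p → ∀ c, l[m]? = some c → pvVow c = false := by
  induction l generalizing p with
  | nil => simp [pvFV] at h
  | cons c t ih =>
    by_cases hv : pvVow c
    · simp [pvFV, hv] at h; subst h; intro m hm; omega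
    · simp [pvFV, hv] at h
      obtain ⟨q, hq, rfl⟩ := h
      intro m hm d hd
      cases m with
      | zero => simp at hd; subst hd; simpa using hv
      | succ m => exact ih hq m (by omega) d (by simpa using hd)

theorem pvFV_none {l : List Char} (h : pvFV l = none) : ∀ c ∈ l, pvVow c = false := by
  induction l with
  | nil => simp
  | cons c t ih =>
    by_cases hv : pvVow c
    · simp [pvFV, hv] at h
    · simp [pvFV, hv] at h
      intro d hd
      rcases List.mem_cons.1 hd with rfl | hd'
      · simpa using hv
      · exact ih h d hd'

-- [v] is a prefix of t iff t starts with v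
theorem pvSingle_prefix_iff (v : Char) (t : List Char) : [v] <+: t ↔ t[0]? = some v := by
  cases t with
  | nil => simp
  | cons c r => simp [List.cons_prefix_cons, eq_comm]

theorem pvVowels_toList : "aeiou".toList = ['a', 'e', 'i', 'o', 'u'] := rfl

theorem pvMem_vowels_vow {v : Char} (h : v ∈ ['a', 'e', 'i', 'o', 'u']) : pvVow v = true := by
  fin_cases h <;> rfl

theorem pvVow_mem_vowels {v : Char} (h : pvVow v = true) : v ∈ ['a', 'e', 'i', 'o', 'u'] := by
  simp [pvVow] at h
  simp only [List.mem_cons]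
  tauto

-- the crux: next_vowel(k) returns the first vowel index ≥ k (or -1)
theorem pvNextVowel_eq (s : List Char) (k : Nat) (hk : k ≤ s.length) :
    pvNextVowel s (k : Int) =
      (match pvFV (s.drop k) with
       | none => -1
       | some p => ((k + p : Nat) : Int)) := by
  simp only [pvNextVowel]
  rw [pvVowels_toList]
  cases hfv : pvFV (s.drop k) with
  | none =>
    have hnil : (['a','e','i','o','u'].map
        (fun v => PySem.Chars.findFrom s [v] (k : Int))).filter (fun j => j != -1) = [] := by
      rw [List.filter_eq_nil_iff]
      intro j hj
      rw [List.mem_map] at hj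
      obtain ⟨v, hv, rfl⟩ := hj
      have : PySem.Chars.findFrom s [v] (k : Int) = -1 := by
        rw [PySem.Chars.findFrom_natCast_eq_neg_one_iff s [v] k hk]
        rw [List.singleton_infix_iff]
        intro hmem
        exact absurd (pvMem_vowels_vow hv) (by simp [pvFV_none hfv v hmem])
      simp [this]
    rw [hnil]
    simp [PySem.List.min?]
  | some p =>
    obtain ⟨c, hc, hvc⟩ := pvFV_get hfv
    have hsj : s[k + p]? = some c := by
      rw [← List.getElem?_drop]; exact hc
    have hjlt : k + p < s.length := by
      have := pvFV_lt hfv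
      have hkl : (s.drop k).length = s.length - k := by simp
      omega
    have hcmem : c ∈ ['a','e','i','o','u'] := pvVow_mem_vowels hvc
    -- any index i with k ≤ i < k + p holds no vowel
    have hnovow : ∀ i : Nat, k ≤ i → i < k + p → ∀ d, s[i]? = some d → pvVow d = false := by
      intro i hki hip d hd
      have : (s.drop k)[i - k]? = some d := by
        rw [List.getElem?_drop]
        rwa [Nat.add_sub_cancel' hki]
      exact pvFV_min hfv (i - k) (by omega) d this
    -- the search for c lands exactly on k + p
    have hfc : PySem.Chars.findFrom s [c] (k : Int) = ((k + p : Nat) : Int) := by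
      have hne : PySem.Chars.findFrom s [c] (k : Int) ≠ -1 := by
        rw [Ne, PySem.Chars.findFrom_natCast_eq_neg_one_iff s [c] k hk]
        simp only [not_not, List.singleton_infix_iff]
        exact List.mem_of_getElem? hc
      obtain ⟨hkr, hpre, hmin⟩ := PySem.Chars.findFrom_natCast_spec s [c] k hk hne
      set r := PySem.Chars.findFrom s [c] (k : Int) with hr
      have hr0 : (0 : Int) ≤ r := le_trans (by positivity) hkr
      have hrk : k ≤ r.toNat := by omega
      have hrc : s[r.toNat]? = some c := by
        rw [pvSingle_prefix_iff] at hpre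
        rwa [List.getElem?_drop, Nat.add_zero] at hpre
      have h1 : ¬ r.toNat < k + p := by
        intro hlt
        exact absurd hvc (by simp [hnovow r.toNat hrk hlt c hrc])
      have h2 : ¬ k + p < r.toNat := by
        intro hlt
        refine hmin (k + p) (by omega) hlt ?_
        rw [pvSingle_prefix_iff, List.getElem?_drop, Nat.add_zero]
        exact hsj
      omega
    -- every hit is ≥ k + p
    have hlow : ∀ h ∈ (['a','e','i','o','u'].map
        (fun v => PySem.Chars.findFrom s [v] (k : Int))).filter (fun j => j != -1),
        ((k + p : Nat) : Int) ≤ h := by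
      intro h hh
      rw [List.mem_filter] at hh
      obtain ⟨hhm, hhne⟩ := hh
      rw [List.mem_map] at hhm
      obtain ⟨v, hv, rfl⟩ := hhm
      have hne : PySem.Chars.findFrom s [v] (k : Int) ≠ -1 := by simpa using hhne
      obtain ⟨hkr, hpre, _⟩ := PySem.Chars.findFrom_natCast_spec s [v] k hk hne
      set r := PySem.Chars.findFrom s [v] (k : Int) with hr
      have hr0 : (0 : Int) ≤ r := le_trans (by positivity) hkr
      have hrk : k ≤ r.toNat := by omega
      have hrv : s[r.toNat]? = some v := by
        rw [pvSingle_prefix_iff] at hpre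
        rwa [List.getElem?_drop, Nat.add_zero] at hpre
      have : ¬ r.toNat < k + p := by
        intro hlt
        exact absurd (pvMem_vowels_vow hv) (by simp [hnovow r.toNat hrk hlt v hrv])
      omega
    have hjin : ((k + p : Nat) : Int) ∈ (['a','e','i','o','u'].map
        (fun v => PySem.Chars.findFrom s [v] (k : Int))).filter (fun j => j != -1) := by
      rw [List.mem_filter]
      constructor
      · rw [List.mem_map]; exact ⟨c, hcmem, hfc⟩
      · simp only [bne_iff_ne, Ne]
        intro habs; omega
    cases hmn : PySem.List.min? ((['a','e','i','o','u'].map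
        (fun v => PySem.Chars.findFrom s [v] (k : Int))).filter (fun j => j != -1))
        (fun x => x) with
    | none =>
      rw [PySem.List.min?_eq_none_iff] at hmn
      rw [hmn] at hjin
      simp at hjin
    | some m =>
      have h1 := hlow m (PySem.List.min?_mem hmn)
      have h2 : m ≤ ((k + p : Nat) : Int) := PySem.List.min?_isMin hmn _ hjin
      exact le_antisymm h2 h1

-- vowel index list of a suffix, with absolute offsets (characterizes A's loop)
def pvPos (l : List Char) (n : Int) : List Int :=
  ((PySem.List.enumerate l n).filter (fun p => pvVow p.2)).map Prod.fst

-- the value A returns once the second vowel index j is known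
def pvSplice (s : List Char) (j : Int) : Option String :=
  match PySem.List.pyGet? s j with
  | some c =>
    some (String.ofList (PySem.List.slice s none (some j) ++
      [c, c, c] ++ PySem.List.slice s (some j) none))
  | none => none

theorem pvPos_cons (c : Char) (l : List Char) (n : Int) :
    pvPos (c :: l) n = if pvVow c then n :: pvPos l (n + 1) else pvPos l (n + 1) := by
  simp [pvPos, PySem.List.enumerate_cons, List.filter]
  split_ifs with h <;> simp [h]

theorem pvPos_eq_fv (l : List Char) (n : Nat) :
    pvPos l (n : Int) =
      (match pvFV l with
       | none => []
       | some p => ((n + p : Nat) : Int) :: pvPos (l.drop (p + 1)) ((n + p + 1 : Nat) : Int)) := by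
  induction l generalizing n with
  | nil => simp [pvPos, pvFV, PySem.List.enumerate_nil]
  | cons c t ih =>
    by_cases hv : pvVow c
    · rw [pvPos_cons, if_pos hv]
      simp only [pvFV, hv, if_true, List.drop_succ_cons, List.drop_zero]
      have hc : ((n + 0 : Nat) : Int) = (n : Int) := by push_cast; ring
      have hc1 : ((n + 0 + 1 : Nat) : Int) = (n : Int) + 1 := by push_cast; ring
      rw [hc, hc1]
    · have hv' : pvVow c = false := by simpa using hv
      rw [pvPos_cons, if_neg (by simp [hv'])]
      simp only [pvFV, hv', Bool.false_eq_true, if_false]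
      have hc : ((n : Int) + 1) = ((n + 1 : Nat) : Int) := by push_cast; ring
      rw [hc, ih (n + 1)]
      cases hfv : pvFV t with
      | none => rfl
      | some q =>
        simp only [Option.map_some, List.drop_succ_cons]
        congr 2 <;> push_cast <;> ring_nf

theorem pvGet_of_drop (s : List Char) (i : Nat) (c : Char) (rest : List Char)
    (h : s.drop i = c :: rest) : PySem.List.pyGet? s (i : Int) = some c := by
  rw [PySem.List.pyGet?_natCast]
  have h0 : (s.drop i)[0]? = some c := by rw [h]; rfl
  rw [List.getElem?_drop] at h0
  simpa using h0

theorem pvLoopA_one (rest : List Char) : ∀ (s : List Char) (i : Nat), s.drop i = rest →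
    pvLoopA s rest 1 i =
      (match pvPos rest (i : Int) with
       | j :: _ => pvSplice s j
       | [] => none) := by
  induction rest with
  | nil => intro s i h; simp [pvLoopA, pvPos, PySem.List.enumerate_nil]
  | cons c rest ih =>
    intro s i h
    have h' : s.drop (i + 1) = rest := by
      rw [← List.tail_drop, h]; rfl
    by_cases hv : pvVow c = true
    · have hg := pvGet_of_drop s i c rest h
      rw [pvPos_cons, if_pos hv]
      simp only [pvLoopA, hv, if_true]
      simp only [pvSplice, hg]
    · have hv' : pvVow c = false := by simpa using hv
      rw [pvPos_cons, if_neg (by simp [hv'])]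
      simp only [pvLoopA, hv', Bool.false_eq_true, if_false]
      norm_num
      rw [ih s (i + 1) h']
      norm_cast

theorem pvLoopA_zero (rest : List Char) : ∀ (s : List Char) (i : Nat), s.drop i = rest →
    pvLoopA s rest 0 i =
      (match pvPos rest (i : Int) with
       | _ :: j :: _ => pvSplice s j
       | _ => none) := by
  induction rest with
  | nil => intro s i h; simp [pvLoopA, pvPos, PySem.List.enumerate_nil]
  | cons c rest ih =>
    intro s i h
    have h' : s.drop (i + 1) = rest := by
      rw [← List.tail_drop, h]; rfl
    by_cases hv : pvVow c = true
    · rw [pvPos_cons, if_pos hv]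
      simp only [pvLoopA, hv, if_true]
      norm_num
      rw [pvLoopA_one rest s (i + 1) h']
      have hc : ((i + 1 : Nat) : Int) = (i : Int) + 1 := by push_cast; ring
      rw [hc]
      cases pvPos rest ((i : Int) + 1) <;> rfl
    · have hv' : pvVow c = false := by simpa using hv
      rw [pvPos_cons, if_neg (by simp [hv'])]
      simp only [pvLoopA, hv', Bool.false_eq_true, if_false]
      norm_num
      rw [ih s (i + 1) h']
      norm_cast

theorem pvTake_one {s : List Char} {m : Nat} {c : Char} (h : s[m]? = some c) :
    (s.drop m).take 1 = [c] := by
  have h0 : (s.drop m)[0]? = some c := by rw [List.getElem?_drop]; simpa using h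
  cases hd : s.drop m with
  | nil => rw [hd] at h0; simp at h0
  | cons a t => rw [hd] at h0; simp at h0; rw [h0]; rfl

-- conditional forms of the two characterizations
theorem pvPos_fv_none {l : List Char} (n : Nat) (h : pvFV l = none) :
    pvPos l (n : Int) = [] := by
  rw [pvPos_eq_fv l n, h]

theorem pvPos_fv_some {l : List Char} {p : Nat} (n : Nat) (h : pvFV l = some p) :
    pvPos l (n : Int) = ((n + p : Nat) : Int) :: pvPos (l.drop (p + 1)) ((n + p + 1 : Nat) : Int) := by
  rw [pvPos_eq_fv l n, h]

theorem pvNV_none {s : List Char} {k : Nat} (hk : k ≤ s.length) (h : pvFV (s.drop k) = none) :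
    pvNextVowel s (k : Int) = -1 := by
  rw [pvNextVowel_eq s k hk, h]

theorem pvNV_some {s : List Char} {k p : Nat} (hk : k ≤ s.length) (h : pvFV (s.drop k) = some p) :
    pvNextVowel s (k : Int) = ((k + p : Nat) : Int) := by
  rw [pvNextVowel_eq s k hk, h]

-- ===== VERDICT (by name: the statement is the Claim_ definition above) =====
theorem long_vowel_spec : Claim_equal_long_vowel := by
  intro string _
  unfold Spec_long_vowel long_vowel
  simp only [long_vowel_alt]
  have hA := pvLoopA_zero string.toList string.toList 0 (by simp)
  simp only [Int.natCast_zero] at hA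
  rw [hA]
  cases hfv : pvFV string.toList with
  | none =>
    have h1 : pvPos string.toList (0 : Int) = [] := by
      have := pvPos_fv_none (l := string.toList) 0 hfv
      simpa using this
    have h2 : pvNextVowel string.toList 0 = -1 := by
      have := pvNV_none (s := string.toList) (k := 0) (by simp) (by simpa using hfv)
      simpa using this
    rw [h1, h2]
    simp
  | some p =>
    have hlen := pvFV_lt hfv
    have hp1 : p + 1 ≤ string.toList.length := hlen
    have h1 : pvPos string.toList (0 : Int) =
        ((p : Nat) : Int) :: pvPos (string.toList.drop (p + 1)) ((p + 1 : Nat) : Int) := by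
      have := pvPos_fv_some (l := string.toList) 0 hfv
      simpa using this
    have h2 : pvNextVowel string.toList 0 = ((p : Nat) : Int) := by
      have := pvNV_some (s := string.toList) (k := 0) (p := p) (by simp) (by simpa using hfv)
      simpa using this
    rw [h1, h2, if_neg (by omega : ¬ ((p : Int) = -1))]
    rw [show ((p : Int) + 1) = ((p + 1 : Nat) : Int) by push_cast; ring]
    cases hfv2 : pvFV (string.toList.drop (p + 1)) with
    | none =>
      rw [pvPos_fv_none (p + 1) hfv2, pvNV_none hp1 hfv2]
      simp
    | some q =>
      rw [pvPos_fv_some (p + 1) hfv2, pvNV_some hp1 hfv2]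
      rw [if_neg (by omega : ¬ (((p + 1 + q : Nat) : Int) = -1))]
      obtain ⟨c, hc, hvc⟩ := pvFV_get hfv2
      have hsj : string.toList[p + 1 + q]? = some c := by
        rw [← List.getElem?_drop]; exact hc
      simp only [pvSplice]
      rw [PySem.List.pyGet?_natCast, hsj]
      have hsl : PySem.List.slice string.toList (some ((p + 1 + q : Nat) : Int))
          (some (((p + 1 + q : Nat) : Int) + 1)) = [c] := by
        rw [show (((p + 1 + q : Nat) : Int) + 1) = ((p + 1 + q + 1 : Nat) : Int) by push_cast; ring]
        rw [PySem.List.slice_natCast]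
        rw [show p + 1 + q + 1 - (p + 1 + q) = 1 by omega]
        exact pvTake_one hsj
      rw [hsl]
      rfl
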